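-- pv_equiv track=rewrite | github.com/musharrafhamraz/Computer-Vision-Projects | handLandMarkDetector/chemistry_project.py | get_selected_element
-- ===== SOURCE A (Python) =====
-- elements_first = ["O", "Se", "Ca", "He", "S", "N", "Mg", "C", "Cl"]
--
-- elements_second = ["H", "Na", "Bi"]
--
-- def is_within_box(x, y, box_x, box_y, box_width, box_height):
--     return box_x <= x <= box_x + box_width and box_y <= y <= box_y + box_height
--
-- def get_selected_element(x, y):
--     # Check if the fingertip is over an element in elements_first (top row)
--     for i, element in enumerate(elements_first):
--         box_x = i * 120 + 50
--         box_y = 10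
--         if is_within_box(x, y, box_x, box_y, 100, 80):  # Width=100, Height=80 for each element box
--             return element
--
--     # Check if the fingertip is over an element in elements_second (left column)
--     for i, element in enumerate(elements_second):
--         box_x = 50
--         box_y = i * 100 + 150
--         if is_within_box(x, y, box_x, box_y, 100, 80):
--             return element
--
--     return None
-- ===== SOURCE B (Python) =====
-- elements_first = ["O", "Se", "Ca", "He", "S", "N", "Mg", "C", "Cl"]
--
-- elements_second = ["H", "Na", "Bi"]
--
-- def get_selected_element(x, y):
--     # Direct index computation instead of scanning: the top-row boxes start
--     # every 120 px at x=50, so only column i = (x-50)//120 can contain (x,y).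
--     i = (x - 50) // 120
--     if 0 <= i < len(elements_first) and x <= 50 + 120 * i + 100 and 10 <= y <= 90:
--         return elements_first[i]
--     # Left-column boxes start every 100 px at y=150.
--     j = (y - 150) // 100
--     if 0 <= j < len(elements_second) and y <= 150 + 100 * j + 80 and 50 <= x <= 150:
--         return elements_second[j]
--     return None
-- ===== Notes on version B (the rewrite author's own statement) =====
-- stated objective: alternative
-- what changed: Replaces the two linear scans over the element lists with direct arithmetic: the candidate column/row index is computed by one floor division and checked against a single box, so no loop remains.
import Mathlib
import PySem

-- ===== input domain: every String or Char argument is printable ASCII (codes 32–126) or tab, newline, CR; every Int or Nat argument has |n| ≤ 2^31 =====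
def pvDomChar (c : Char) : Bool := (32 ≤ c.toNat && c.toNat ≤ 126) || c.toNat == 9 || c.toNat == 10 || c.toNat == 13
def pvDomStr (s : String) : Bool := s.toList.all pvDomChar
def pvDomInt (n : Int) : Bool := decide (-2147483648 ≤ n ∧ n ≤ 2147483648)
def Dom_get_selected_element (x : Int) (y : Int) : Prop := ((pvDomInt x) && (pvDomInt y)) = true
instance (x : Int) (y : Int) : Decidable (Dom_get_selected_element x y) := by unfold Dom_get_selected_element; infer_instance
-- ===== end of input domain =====

-- B replaces A's two linear scans by a direct index computation (one floor division per row/column); exact same return values.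

-- ===== PORT A =====
def elements_first : List String := ["O", "Se", "Ca", "He", "S", "N", "Mg", "C", "Cl"]

def elements_second : List String := ["H", "Na", "Bi"]

def is_within_box (x y box_x box_y box_width box_height : Int) : Bool :=
  decide (box_x ≤ x ∧ x ≤ box_x + box_width) && decide (box_y ≤ y ∧ y ≤ box_y + box_height)

-- the first for-loop with early return, over enumerate(elements_first)
def scan_first (x y : Int) : List (Int × String) → Option String
  | [] => none
  | (i, element) :: rest =>
    if is_within_box x y (i * 120 + 50) 10 100 80 then some element
    else scan_first x y rest

-- the second for-loop with early return, over enumerate(elements_second)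
def scan_second (x y : Int) : List (Int × String) → Option String
  | [] => none
  | (i, element) :: rest =>
    if is_within_box x y 50 (i * 100 + 150) 100 80 then some element
    else scan_second x y rest

def get_selected_element (x : Int) (y : Int) : Option String :=
  match scan_first x y (PySem.List.enumerate elements_first) with
  | some e => some e
  | none => scan_second x y (PySem.List.enumerate elements_second)

-- ===== PORT B =====
def get_selected_element_alt (x : Int) (y : Int) : Option String :=
  let i := PySem.Int.floordiv (x - 50) 120
  if 0 ≤ i ∧ i < (elements_first.length : Int) ∧ x ≤ 50 + 120 * i + 100 ∧ 10 ≤ y ∧ y ≤ 90 then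
    PySem.List.pyGet? elements_first i
  else
    let j := PySem.Int.floordiv (y - 150) 100
    if 0 ≤ j ∧ j < (elements_second.length : Int) ∧ y ≤ 150 + 100 * j + 80 ∧ 50 ≤ x ∧ x ≤ 150 then
      PySem.List.pyGet? elements_second j
    else
      none

-- ===== PRECONDITION & SPEC =====
def Spec_get_selected_element (x : Int) (y : Int) (out : Option String) : Prop := out = get_selected_element_alt x y
instance (x : Int) (y : Int) (out : Option String) : Decidable (Spec_get_selected_element x y out) := by unfold Spec_get_selected_element; infer_instance

-- ===== CLAIM (what is proved, stated in full; the proofs are below) =====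
def Claim_equal_get_selected_element : Prop := ∀ (x : Int) (y : Int), Dom_get_selected_element x y → Spec_get_selected_element x y (get_selected_element x y)

-- ===== LEMMAS AND PROOFS =====

set_option maxHeartbeats 1000000 in
theorem get_selected_element_equiv (x y : Int) :
    get_selected_element x y = get_selected_element_alt x y := by
  have hfd : PySem.Int.floordiv (x - 50) 120 = (x - 50) / 120 :=
    PySem.Int.floordiv_eq_ediv_of_pos (by norm_num)
  have hfd' : PySem.Int.floordiv (y - 150) 100 = (y - 150) / 100 :=
    PySem.Int.floordiv_eq_ediv_of_pos (by norm_num)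
  unfold get_selected_element get_selected_element_alt
  simp only [hfd, hfd', elements_first, elements_second, PySem.List.enumerate,
    scan_first, scan_second, is_within_box, Bool.and_eq_true, decide_eq_true_eq,
    List.length_cons, List.length_nil]
  set i := (x - 50) / 120 with hi
  set j := (y - 150) / 100 with hj
  split_ifs <;>
    first
      | rfl
      | omega
      | (rcases (by omega : i = 0 ∨ i = 1 ∨ i = 2 ∨ i = 3 ∨ i = 4 ∨ i = 5 ∨ i = 6 ∨ i = 7 ∨ i = 8) with h|h|h|h|h|h|h|h|h <;>
          rw [h] <;> first | rfl | omega)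
      | (rcases (by omega : j = 0 ∨ j = 1 ∨ j = 2) with h|h|h <;>
          rw [h] <;> first | rfl | omega)

-- ===== VERDICT (by name: the statement is the Claim_ definition above) =====
theorem get_selected_element_spec : Claim_equal_get_selected_element := by
  intro x y _
  exact get_selected_element_equiv x y
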